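-- pv_equiv track=rewrite | github.com/aslan-ng/idetc-ai-adoption-paper | predict_surrogate.py | generate_polynomial_powers
-- ===== SOURCE A (Python) =====
-- from itertools import combinations_with_replacement
-- from typing import Dict, List, Tuple
--
-- def generate_polynomial_powers(n_vars: int, degree: int) -> List[Tuple[int, ...]]:
--     powers = [(0,) * n_vars]
--
--     for d in range(1, degree + 1):
--         for combo in combinations_with_replacement(range(n_vars), d):
--             exps = [0] * n_vars
--             for idx in combo:
--                 exps[idx] += 1
--             powers.append(tuple(exps))
--
--     return powers
-- ===== SOURCE B (Python) =====
-- def generate_polynomial_powers(n_vars, degree):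
--     def exps(k, rem):
--         # exponent tuples of length k summing to exactly rem, first exponent descending
--         if k <= 0:
--             return [()] if rem == 0 else []
--         return [(e,) + rest for e in range(rem, -1, -1) for rest in exps(k - 1, rem - e)]
--
--     powers = [(0,) * n_vars]
--     for d in range(1, degree + 1):
--         powers.extend(exps(n_vars, d))
--     return powers
-- ===== Notes on version B (the rewrite author's own statement) =====
-- stated objective: alternative
-- what changed: Replaces combinations_with_replacement plus a per-combo counting pass by a direct recursive enumeration of exponent tuples of each exact degree (choose each variable's exponent from the remaining budget downward), which emits the same tuples in the same order without building index combos.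
import Mathlib
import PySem

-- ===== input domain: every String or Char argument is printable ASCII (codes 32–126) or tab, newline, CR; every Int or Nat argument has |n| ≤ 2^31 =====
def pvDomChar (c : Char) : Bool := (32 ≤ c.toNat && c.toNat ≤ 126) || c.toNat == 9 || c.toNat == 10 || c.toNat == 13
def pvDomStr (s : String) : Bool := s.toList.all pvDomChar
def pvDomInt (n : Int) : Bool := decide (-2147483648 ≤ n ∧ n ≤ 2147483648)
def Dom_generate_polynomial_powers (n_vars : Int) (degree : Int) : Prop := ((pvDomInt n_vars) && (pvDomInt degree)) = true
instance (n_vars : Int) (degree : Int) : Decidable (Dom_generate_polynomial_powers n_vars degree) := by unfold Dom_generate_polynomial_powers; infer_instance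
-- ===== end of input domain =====

-- B replaces combinations_with_replacement + per-combo counting by a direct recursive
-- enumeration of exponent tuples of each exact degree (alternative decomposition, same output).


-- ===== PORT A =====
-- hand port of itertools.combinations_with_replacement(range(n), r) (no PySem primitive):
-- lexicographic non-decreasing index tuples; first element i from lo..n-1, rest drawn from i..n-1.
def pvCwr (n : Nat) (lo : Nat) (r : Nat) : List (List Nat) :=
  match r with
  | 0 => [[]]
  | r' + 1 => (List.range' lo (n - lo)).flatMap fun i => (pvCwr n i r').map (i :: ·)

-- exps[idx] += 1
def pvBump (exps : List Int) (idx : Nat) : List Int :=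
  exps.set idx (exps.getD idx 0 + 1)

def generate_polynomial_powers (n_vars : Int) (degree : Int) : List (List Int) :=
  (PySem.List.pyRange 1 (degree + 1) 1).foldl
    (fun powers d =>
      powers ++ (pvCwr n_vars.toNat 0 d.toNat).map
        (fun combo => combo.foldl pvBump (List.replicate n_vars.toNat 0)))
    [List.replicate n_vars.toNat 0]

-- ===== PORT B =====
-- exps(k, rem): exponent tuples of length k summing to exactly rem, first exponent descending
-- (Python's `k <= 0` base case is reached with k = 0 here since the entry clamps via toNat).
def pvExps (k : Nat) (rem : Nat) : List (List Int) :=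
  match k with
  | 0 => if rem = 0 then [[]] else []
  | k' + 1 => ((List.range (rem + 1)).reverse).flatMap fun e => (pvExps k' (rem - e)).map ((e : Int) :: ·)

def generate_polynomial_powers_alt (n_vars : Int) (degree : Int) : List (List Int) :=
  (PySem.List.pyRange 1 (degree + 1) 1).foldl
    (fun powers d => powers ++ pvExps n_vars.toNat d.toNat)
    [List.replicate n_vars.toNat 0]

-- ===== PRECONDITION & SPEC =====
def Spec_generate_polynomial_powers (n_vars : Int) (degree : Int) (out : List (List Int)) : Prop := out = generate_polynomial_powers_alt n_vars degree
instance (n_vars : Int) (degree : Int) (out : List (List Int)) : Decidable (Spec_generate_polynomial_powers n_vars degree out) := by unfold Spec_generate_polynomial_powers; infer_instance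

-- ===== CLAIM (what is proved, stated in full; the proofs are below) =====
def Claim_equal_generate_polynomial_powers : Prop := ∀ (n_vars : Int) (degree : Int), Dom_generate_polynomial_powers n_vars degree → Spec_generate_polynomial_powers n_vars degree (generate_polynomial_powers n_vars degree)

-- ===== LEMMAS AND PROOFS =====

-- exponent vector of combo c over variable positions lo, lo+1, …, lo+k-1
def pvE (c : List Nat) (lo k : Nat) : List Int :=
  (List.range' lo k).map (fun j => (c.count j : Int))

def pvIncHead : List Int → List Int
  | [] => []
  | a :: t => (a + 1) :: t

lemma pvCwr_mem_bounds : ∀ (r n lo : Nat), ∀ c ∈ pvCwr n lo r, ∀ i ∈ c, lo ≤ i ∧ i < n := by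
  intro r
  induction r with
  | zero => intro n lo c hc i hi; simp [pvCwr] at hc; simp [hc] at hi
  | succ r ih =>
    intro n lo c hc i hi
    simp only [pvCwr, List.mem_flatMap, List.mem_map] at hc
    obtain ⟨j, hj, rest, hrest, rfl⟩ := hc
    have hjb : lo ≤ j ∧ j < lo + (n - lo) := List.mem_range'_1.mp hj
    rcases List.mem_cons.mp hi with rfl | hi'
    · omega
    · have := ih n j rest hrest i hi'
      omega

lemma pvBump_map (f : Nat → Int) (n idx : Nat) (h : idx < n) :
    pvBump ((List.range n).map f) idx
      = (List.range n).map (fun j => f j + if j = idx then 1 else 0) := by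
  unfold pvBump
  have hget : ((List.range n).map f).getD idx 0 = f idx := by
    rw [List.getD_eq_getElem?_getD]
    simp [h]
  rw [hget]
  apply List.ext_getElem
  · simp
  · intro i h1 h2
    simp only [List.length_set, List.length_map, List.length_range] at h1
    rw [List.getElem_set]
    by_cases hi : idx = i
    · simp [hi]
    · simp [hi]; omega

lemma pvFoldl_bump : ∀ (c : List Nat) (n : Nat) (f : Nat → Int), (∀ i ∈ c, i < n) →
    c.foldl pvBump ((List.range n).map f)
      = (List.range n).map (fun j => f j + (c.count j : Int)) := by
  intro c
  induction c with
  | nil => intro n f _; simp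
  | cons a c ih =>
    intro n f h
    have ha : a < n := h a (List.mem_cons_self)
    rw [List.foldl_cons, pvBump_map f n a ha,
        ih n _ (fun i hi => h i (List.mem_cons_of_mem a hi))]
    apply List.map_congr_left
    intro j _
    simp only [List.count_cons]
    by_cases hj : j = a
    · simp [hj]; ring
    · have hne : ¬ (a == j) := by simp [Ne.symm hj]
      simp [hj, hne]

lemma pvFoldl_eq_pvE (c : List Nat) (n : Nat) (h : ∀ i ∈ c, i < n) :
    c.foldl pvBump (List.replicate n 0) = pvE c 0 n := by
  have hrep : (List.replicate n (0 : Int)) = (List.range n).map (fun _ => 0) := by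
    simp [List.map_const']
  rw [hrep, pvFoldl_bump c n _ h]
  unfold pvE
  rw [List.range_eq_range']
  simp

lemma pvExps_zero : ∀ k : Nat, pvExps k 0 = [List.replicate k 0] := by
  intro k
  induction k with
  | zero => simp [pvExps]
  | succ k ih => simp [pvExps, List.range_succ, ih, List.replicate_succ]

-- descending-loop recurrence: peel the top exponent e = r+1, leaving the e = 0 tail group
lemma pvExps_succ_succ (k r : Nat) :
    pvExps (k + 1) (r + 1)
      = (pvExps (k + 1) r).map pvIncHead ++ (pvExps k (r + 1)).map ((0 : Int) :: ·) := by
  have hsplit : (List.range (r + 2)).reverse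
      = ((List.range (r + 1)).map Nat.succ).reverse ++ [0] := by
    rw [List.range_succ_eq_map]
    simp
  conv_lhs => rw [pvExps, hsplit]
  rw [List.flatMap_append]
  congr 1
  · have hB : pvExps (k + 1) r
        = (List.range (r + 1)).reverse.flatMap
            (fun e => (pvExps k (r - e)).map ((e : Int) :: ·)) := rfl
    rw [hB, List.map_flatMap, ← List.map_reverse, List.flatMap_map]
    apply List.flatMap_congr
    intro e _
    have h1 : r + 1 - Nat.succ e = r - e := by omega
    rw [h1, List.map_map]
    apply List.map_congr_left
    intro v _
    simp only [Function.comp_apply, pvIncHead, Nat.succ_eq_add_one]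
    push_cast
    ring_nf
  · simp

lemma pvCwr_step (n lo r : Nat) (h : lo < n) :
    pvCwr n lo (r + 1)
      = ((pvCwr n lo r).map (lo :: ·)) ++ pvCwr n (lo + 1) (r + 1) := by
  have hr : List.range' lo (n - lo) = lo :: List.range' (lo + 1) (n - (lo + 1)) := by
    have h1 : n - lo = (n - (lo + 1)) + 1 := by omega
    rw [h1, List.range'_succ]
  conv_lhs => rw [pvCwr, hr]
  rw [List.flatMap_cons]
  congr 1

lemma pvE_cons_of_lb (c : List Nat) (lo k : Nat) :
    pvE c lo (k + 1) = (c.count lo : Int) :: pvE c (lo + 1) k := by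
  unfold pvE
  rw [List.range'_succ]
  simp

lemma pvCount_lo_zero (c : List Nat) (lo : Nat) (h : ∀ i ∈ c, lo + 1 ≤ i) :
    c.count lo = 0 := by
  rw [List.count_eq_zero]
  intro hmem
  exact absurd (h lo hmem) (by omega)

-- the key correspondence: exponent vectors of the combos, in order, are exactly pvExps
lemma pvMain : ∀ (r k lo : Nat),
    (pvCwr (lo + k) lo r).map (fun c => pvE c lo k) = pvExps k r := by
  intro r
  induction r with
  | zero =>
    intro k lo
    simp [pvCwr, pvExps_zero, pvE]
  | succ r ihr =>
    intro k
    induction k with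
    | zero =>
      intro lo
      simp [pvCwr, pvExps]
    | succ k ihk =>
      intro lo
      have hlt : lo < lo + (k + 1) := by omega
      rw [pvCwr_step _ _ _ hlt, List.map_append]
      rw [pvExps_succ_succ]
      congr 1
      · -- combos starting with lo: head exponent bumps
        rw [List.map_map, ← ihr (k + 1) lo, List.map_map]
        apply List.map_congr_left
        intro c hc
        have hb : ∀ i ∈ c, lo ≤ i ∧ i < lo + (k + 1) := pvCwr_mem_bounds r _ lo c hc
        show pvE (lo :: c) lo (k + 1) = pvIncHead (pvE c lo (k + 1))
        unfold pvE
        rw [List.range'_succ]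
        simp only [List.map_cons, pvIncHead]
        refine List.cons_eq_cons.mpr ⟨?_, ?_⟩
        · rw [List.count_cons_self]; push_cast; ring
        · apply List.map_congr_left
          intro j hj
          have hjb : lo + 1 ≤ j := (List.mem_range'_1.mp hj).1
          rw [List.count_cons_of_ne (by omega)]
      · -- combos starting at lo+1: head exponent is 0
        have harith : lo + (k + 1) = (lo + 1) + k := by omega
        rw [harith, ← ihk (lo + 1), List.map_map]
        apply List.map_congr_left
        intro c hc
        have hb : ∀ i ∈ c, lo + 1 ≤ i ∧ i < (lo + 1) + k :=
          pvCwr_mem_bounds (r + 1) _ (lo + 1) c hc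
        show pvE c lo (k + 1) = (0 : Int) :: pvE c (lo + 1) k
        rw [pvE_cons_of_lb c lo k,
            pvCount_lo_zero c lo (fun i hi => (hb i hi).1)]
        simp

lemma pvPerDegree (n d : Nat) :
    (pvCwr n 0 d).map (fun combo => combo.foldl pvBump (List.replicate n 0)) = pvExps n d := by
  have h := pvMain d n 0
  rw [Nat.zero_add] at h
  rw [← h]
  apply List.map_congr_left
  intro c hc
  exact pvFoldl_eq_pvE c n (fun i hi => by
    have := pvCwr_mem_bounds d n 0 c hc i hi
    omega)

-- ===== VERDICT (by name: the statement is the Claim_ definition above) =====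
theorem generate_polynomial_powers_spec : Claim_equal_generate_polynomial_powers := by
  intro n_vars degree _
  show _ = _
  unfold generate_polynomial_powers generate_polynomial_powers_alt
  have hfun : (fun (powers : List (List Int)) (d : Int) =>
        powers ++ (pvCwr n_vars.toNat 0 d.toNat).map
          (fun combo => combo.foldl pvBump (List.replicate n_vars.toNat 0)))
      = (fun powers d => powers ++ pvExps n_vars.toNat d.toNat) := by
    funext powers d
    rw [pvPerDegree]
  rw [hfun]
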